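-- pv_equiv track=rewrite | github.com/22elix3r/TalkingHeadBench | server/llm_adapter.py | _phonemes_from_positions
-- ===== SOURCE A (Python) =====
-- from typing import Any, Literal
--
-- def _as_int(value: Any, *, default: int = 0) -> int:
--     if isinstance(value, bool):
--         return default
--     if isinstance(value, int):
--         return value
--     if isinstance(value, float):
--         return int(value)
--     return default
--
-- def _phonemes_from_positions(
--     positions: list[Any],
--     token_position_to_phoneme: Any,
-- ) -> list[str]:
--     if not isinstance(token_position_to_phoneme, dict):
--         return []
--
--     mapped: list[str] = []
--     for position in positions:
--         idx = _as_int(position, default=-1)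
--         if idx < 0:
--             continue
--         key = str(idx)
--         value = token_position_to_phoneme.get(key)
--         if value is None and idx in token_position_to_phoneme:
--             value = token_position_to_phoneme.get(idx)
--         if isinstance(value, str) and value not in mapped:
--             mapped.append(value)
--         if len(mapped) >= 16:
--             break
--     return mapped
-- ===== SOURCE B (Python) =====
-- def _as_int(value, *, default=0):
--     if isinstance(value, bool):
--         return default
--     if isinstance(value, int):
--         return value
--     if isinstance(value, float):
--         return int(value)
--     return default
--
--
-- def _phonemes_from_positions(positions, token_position_to_phoneme):
--     if not isinstance(token_position_to_phoneme, dict):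
--         return []
--     # Stage 1: one flat pass collecting every mapped phoneme (A's exact filter,
--     # no in-loop dedup, no early break).
--     values = []
--     for position in positions:
--         idx = _as_int(position, default=-1)
--         if idx < 0:
--             continue
--         value = token_position_to_phoneme.get(str(idx))
--         if value is None and idx in token_position_to_phoneme:
--             value = token_position_to_phoneme.get(idx)
--         if isinstance(value, str):
--             values.append(value)
--     # Stage 2: dedup keeping first occurrences; stage 3: cap at 16.
--     return list(dict.fromkeys(values))[:16]
-- ===== Notes on version B (the rewrite author's own statement) =====
-- stated objective: simpler
-- what changed: A's single loop interleaving the membership-dedup, the append and an early break at 16 is split into three plain stages: one flat collecting pass with no dedup and no break, then dict.fromkeys for first-occurrence dedup, then a [:16] cap.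
import Mathlib
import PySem

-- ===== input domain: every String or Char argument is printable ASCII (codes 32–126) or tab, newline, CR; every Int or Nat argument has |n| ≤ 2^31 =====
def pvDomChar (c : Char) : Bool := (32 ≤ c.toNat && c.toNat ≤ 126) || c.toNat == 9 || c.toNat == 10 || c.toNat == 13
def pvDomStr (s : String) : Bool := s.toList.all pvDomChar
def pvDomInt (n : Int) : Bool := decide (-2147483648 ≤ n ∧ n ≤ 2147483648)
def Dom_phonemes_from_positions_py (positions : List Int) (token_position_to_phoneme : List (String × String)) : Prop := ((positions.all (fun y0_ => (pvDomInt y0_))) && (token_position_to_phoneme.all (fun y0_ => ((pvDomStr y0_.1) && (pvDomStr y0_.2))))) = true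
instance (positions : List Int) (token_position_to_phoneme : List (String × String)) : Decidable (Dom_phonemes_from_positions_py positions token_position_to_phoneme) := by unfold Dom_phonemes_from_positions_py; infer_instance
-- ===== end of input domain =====

-- ===== PORT A =====
-- B reorganises A's single interleaved filter/dedup/cap-break loop into three plain stages (objective: simpler).
-- Typed-domain notes (exact on Dom): `_as_int(position, default=-1)` returns the int itself (positions are ints,
-- never bool/float), so `idx = position`; `isinstance(token_position_to_phoneme, dict)` is always true; the fallback
-- `value is None and idx in token_position_to_phoneme` compares an int against the dict's string keys and never
-- fires, and `isinstance(value, str)` is always true for a found value — those dead branches are noted here, not ported.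
def pvALoop (d : List (String × String)) : List Int → List String → List String
  | [], mapped => mapped
  | p :: rest, mapped =>
    if p < 0 then pvALoop d rest mapped
    else
      let mapped' :=
        match (PySem.Dict.mk d).get? (PySem.Int.toStr p) with
        | some v => if mapped.contains v then mapped else mapped ++ [v]
        | none => mapped
      if 16 ≤ mapped'.length then mapped' else pvALoop d rest mapped'

def phonemes_from_positions_py (positions : List Int) (token_position_to_phoneme : List (String × String)) : List String :=
  pvALoop token_position_to_phoneme positions []

-- ===== PORT B =====
-- Stage 1: flat collecting pass (Source B's for-loop, no dedup, no break); stage 2: list(dict.fromkeys(values))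
-- = PySem.List.dedup; stage 3: values[:16] with a nonnegative literal bound = List.take 16 (exact).
def phonemes_from_positions_py_alt (positions : List Int) (token_position_to_phoneme : List (String × String)) : List String :=
  let values := positions.foldl (fun acc p =>
    if p < 0 then acc
    else
      match (PySem.Dict.mk token_position_to_phoneme).get? (PySem.Int.toStr p) with
      | some v => acc ++ [v]
      | none => acc) []
  (PySem.List.dedup values).take 16

-- ===== PRECONDITION & SPEC =====
def Spec_phonemes_from_positions_py (positions : List Int) (token_position_to_phoneme : List (String × String)) (out : List String) : Prop := out = phonemes_from_positions_py_alt positions token_position_to_phoneme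
instance (positions : List Int) (token_position_to_phoneme : List (String × String)) (out : List String) : Decidable (Spec_phonemes_from_positions_py positions token_position_to_phoneme out) := by unfold Spec_phonemes_from_positions_py; infer_instance

-- ===== CLAIM (what is proved, stated in full; the proofs are below) =====
def Claim_equal_phonemes_from_positions_py : Prop := ∀ (positions : List Int) (token_position_to_phoneme : List (String × String)), Dom_phonemes_from_positions_py positions token_position_to_phoneme → Spec_phonemes_from_positions_py positions token_position_to_phoneme (phonemes_from_positions_py positions token_position_to_phoneme)

-- ===== LEMMAS AND PROOFS =====
-- the flat collecting pass, as a structural recursion (proof helper)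
def pvCollect (d : List (String × String)) : List Int → List String
  | [] => []
  | p :: rest =>
    if p < 0 then pvCollect d rest
    else
      match (PySem.Dict.mk d).get? (PySem.Int.toStr p) with
      | some v => v :: pvCollect d rest
      | none => pvCollect d rest

theorem pvFoldl_eq_collect (d : List (String × String)) (ps : List Int) (acc : List String) :
    ps.foldl (fun acc p =>
      if p < 0 then acc
      else
        match (PySem.Dict.mk d).get? (PySem.Int.toStr p) with
        | some v => acc ++ [v]
        | none => acc) acc = acc ++ pvCollect d ps := by
  induction ps generalizing acc with
  | nil => simp [pvCollect]
  | cons p rest ih =>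
    simp only [List.foldl_cons, pvCollect]
    by_cases hp : p < 0
    · simp [hp, ih]
    · cases h : (PySem.Dict.mk d).get? (PySem.Int.toStr p) with
      | some v => simp [hp, ih]
      | none => simp [hp, ih]

theorem pvLoop_eq (d : List (String × String)) (ps : List Int) (s : List String)
    (hs : s.length < 16) :
    pvALoop d ps s = (PySem.Set.update s (pvCollect d ps)).take 16 := by
  induction ps generalizing s with
  | nil =>
    simp only [pvALoop, pvCollect, PySem.Set.update]
    simp [List.take_of_length_le (Nat.le_of_lt hs)]
  | cons p rest ih =>
    simp only [pvALoop, pvCollect]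
    by_cases hp : p < 0
    · simp only [hp, if_true]; exact ih s hs
    · simp only [hp, if_false]
      cases h : (PySem.Dict.mk d).get? (PySem.Int.toStr p) with
      | none =>
        show (if 16 ≤ s.length then s else pvALoop d rest s) = _
        rw [if_neg (by omega)]
        exact ih s hs
      | some v =>
        show (if 16 ≤ (if s.contains v then s else s ++ [v]).length then _ else pvALoop d rest _) = _
        rw [PySem.Set.update_cons]
        by_cases hv : v ∈ s
        · have hc : s.contains v = true := by simpa using hv
          rw [PySem.Set.add_of_mem hv]
          simp only [hc, if_true]
          rw [if_neg (by omega)]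
          exact ih s hs
        · have hc : s.contains v = false := by simpa using hv
          rw [PySem.Set.add_of_not_mem hv]
          simp only [hc, Bool.false_eq_true, if_false]
          by_cases hlen : 16 ≤ (s ++ [v]).length
          · rw [if_pos hlen]
            have h16 : (s ++ [v]).length = 16 := by
              simp only [List.length_append, List.length_cons, List.length_nil] at hlen ⊢
              omega
            rw [PySem.Set.update_eq_append_filter, ← h16, List.take_left]
          · rw [if_neg hlen]
            exact ih (s ++ [v]) (by omega)

-- ===== VERDICT (by name: the statement is the Claim_ definition above) =====
theorem phonemes_from_positions_py_spec : Claim_equal_phonemes_from_positions_py := by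
  intro positions d _
  unfold Spec_phonemes_from_positions_py phonemes_from_positions_py phonemes_from_positions_py_alt
  rw [pvFoldl_eq_collect d positions []]
  simp only [List.nil_append, PySem.List.dedup_eq_ofList]
  rw [← PySem.Set.update_nil_left]
  exact pvLoop_eq d positions [] (by norm_num)
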